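-- pv_equiv track=rewrite | github.com/kyuhunsim/algorithm | BOJ(Baekjoon_Online_Judge)/string/1652.py | count_lie_down_places
-- ===== SOURCE A (Python) =====
-- def count_lie_down_places(N, room):
--     horizontal_count = 0
--     vertical_count = 0
--
--     # 가로 방향 검사
--     for row in room:
--         count = 0
--         for char in row:
--             if char == '.':
--                 count += 1
--             else:
--                 if count >= 2:
--                     horizontal_count += 1
--                 count = 0
--         if count >= 2:
--             horizontal_count += 1
--
--     # 세로 방향 검사
--     for col in range(N):
--         count = 0
--         for row in range(N):
--             if room[row][col] == '.':
--                 count += 1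
--             else:
--                 if count >= 2:
--                     vertical_count += 1
--                 count = 0
--         if count >= 2:
--             vertical_count += 1
--
--     return horizontal_count, vertical_count
-- ===== SOURCE B (Python) =====
-- def count_lie_down_places(N, room):
--     def seats(line):
--         # blank out everything that is not '.', then split into maximal dot-runs
--         pieces = ''.join(ch if ch == '.' else ' ' for ch in line).split()
--         return sum(1 for p in pieces if len(p) >= 2)
--
--     horizontal = sum(seats(row) for row in room)
--     cols = [''.join(room[r][c] for r in range(N)) for c in range(N)]
--     vertical = sum(seats(col) for col in cols)
--     return horizontal, vertical
-- ===== Notes on version B (the rewrite author's own statement) =====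
-- stated objective: simpler
-- what changed: Replaces A's per-character counter-and-flush state machine (run twice, once column-major with index arithmetic) by build-line-then-segment: each row, and each materialized column string, is blanked to spaces outside '.', split into maximal dot-runs, and the pieces of length >= 2 are counted.
import Mathlib
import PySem

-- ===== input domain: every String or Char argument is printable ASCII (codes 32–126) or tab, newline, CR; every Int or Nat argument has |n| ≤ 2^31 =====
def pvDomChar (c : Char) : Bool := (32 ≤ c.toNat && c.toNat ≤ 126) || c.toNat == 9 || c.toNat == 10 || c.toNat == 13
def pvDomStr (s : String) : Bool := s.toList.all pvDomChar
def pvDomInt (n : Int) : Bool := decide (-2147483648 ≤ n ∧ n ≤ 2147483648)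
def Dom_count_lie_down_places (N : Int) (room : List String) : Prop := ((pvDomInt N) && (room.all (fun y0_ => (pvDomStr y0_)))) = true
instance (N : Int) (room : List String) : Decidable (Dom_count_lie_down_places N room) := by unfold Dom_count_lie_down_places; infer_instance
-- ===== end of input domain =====

-- B replaces A's per-character counter-and-flush scans by build-line-then-segment (split into maximal dot-runs); objective: simpler.


-- ===== PORT A =====
-- A's inner-loop body: `if char == '.': count += 1 else: (flush run); count = 0`, on state (count, places)
def stepA (st : Int × Int) (c : Char) : Int × Int :=
  if c = '.' then (st.1 + 1, st.2) else (0, if 2 ≤ st.1 then st.2 + 1 else st.2)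

-- A's end-of-line `if count >= 2: places += 1`
def flushA (st : Int × Int) : Int := if 2 ≤ st.1 then st.2 + 1 else st.2

-- room[row][col]; the ' ' / "" defaults are reached only outside Pre_ (where Python raises IndexError)
def cellAt (room : List String) (row col : Int) : Char :=
  (PySem.Str.pyGet? (PySem.List.pyGetD room row "") col).getD ' '

def count_lie_down_places (N : Int) (room : List String) : Int × Int :=
  let horizontal : Int :=
    room.foldl (fun h row => flushA (row.toList.foldl stepA ((0 : Int), h))) 0
  let vertical : Int :=
    (PySem.List.pyRange 0 N 1).foldl (fun v col =>
      flushA ((PySem.List.pyRange 0 N 1).foldl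
        (fun st row => stepA st (cellAt room row col)) ((0 : Int), v))) 0
  (horizontal, vertical)

-- ===== PORT B =====
def sanChar (c : Char) : Char := if c = '.' then c else ' '

def seats (line : String) : Int :=
  (PySem.Str.split₀ (String.ofList (line.toList.map sanChar))).foldl
    (fun acc p => if 2 ≤ PySem.Str.len p then acc + 1 else acc) 0

def count_lie_down_places_alt (N : Int) (room : List String) : Int × Int :=
  let horizontal : Int := (room.map seats).sum
  let cols : List String := (PySem.List.pyRange 0 N 1).map (fun c =>
    String.ofList ((PySem.List.pyRange 0 N 1).map (fun r => cellAt room r c)))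
  let vertical : Int := (cols.map seats).sum
  (horizontal, vertical)

-- ===== PRECONDITION & SPEC =====
-- Pre_ excludes exactly the inputs where Python A raises IndexError in the vertical pass:
-- 0 < N but room has fewer than N rows, or one of the first N rows is shorter than N.
def Pre_count_lie_down_places (N : Int) (room : List String) : Prop :=
  0 < N → (N ≤ (room.length : Int) ∧ ∀ s ∈ room.take N.toNat, N ≤ PySem.Str.len s)
instance (N : Int) (room : List String) : Decidable (Pre_count_lie_down_places N room) := by
  unfold Pre_count_lie_down_places; infer_instance
def pvWitness_count_lie_down_places : Int × List String := (2, ["..", ".#"])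

def Spec_count_lie_down_places (N : Int) (room : List String) (out : Int × Int) : Prop := out = count_lie_down_places_alt N room
instance (N : Int) (room : List String) (out : Int × Int) : Decidable (Spec_count_lie_down_places N room out) := by unfold Spec_count_lie_down_places; infer_instance

-- ===== CLAIM (what is proved, stated in full; the proofs are below) =====
def Claim_equal_count_lie_down_places : Prop := ∀ (N : Int) (room : List String), Dom_count_lie_down_places N room → Pre_count_lie_down_places N room → Spec_count_lie_down_places N room (count_lie_down_places N room)

-- ===== LEMMAS AND PROOFS =====

theorem go_acc (cs : List Char) : ∀ (cur : List Char) (acc : List (List Char)),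
    PySem.Chars.split₀.go cs cur acc = acc.reverse ++ PySem.Chars.split₀.go cs cur [] := by
  induction cs with
  | nil =>
    intro cur acc
    simp only [PySem.Chars.split₀.go]
    by_cases h : cur.isEmpty <;> simp [h]
  | cons c rest ih =>
    intro cur acc
    simp only [PySem.Chars.split₀.go]
    by_cases hs : PySem.Chars.isspace c
    · by_cases h : cur.isEmpty <;>
        simp only [hs, h, if_true, if_false, ite_true, ite_false]
      · rw [ih [] acc]
      · rw [ih [] (cur.reverse :: acc), ih [] [cur.reverse]]
        simp
    · simp only [hs, if_false, Bool.false_eq_true]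
      exact ih (c :: cur) acc

-- the heart: A's counter-and-flush scan over a line equals counting the ≥2-length pieces
-- that split₀ extracts from the sanitized line
theorem key (cs : List Char) : ∀ (cur : List Char) (h : Int),
    flushA (cs.foldl stepA ((cur.length : Int), h)) =
      h + ((PySem.Chars.split₀.go (cs.map sanChar) cur []).countP
            (fun w => decide (2 ≤ w.length)) : Int) := by
  induction cs with
  | nil =>
    intro cur h
    simp only [List.foldl, List.map, PySem.Chars.split₀.go, flushA]
    by_cases hc : cur = []
    · subst hc; simp
    · by_cases h2 : 2 ≤ cur.length
      · have h2' : (2:Int) ≤ (cur.length : Int) := by exact_mod_cast h2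
        simp [List.isEmpty_iff, hc, List.countP_cons, h2, h2']
      · have h2' : ¬ (2:Int) ≤ (cur.length : Int) := by exact_mod_cast h2
        simp [List.isEmpty_iff, hc, List.countP_cons, h2, h2']
  | cons c rest ih =>
    intro cur h
    by_cases hd : c = '.'
    · have hs : PySem.Chars.isspace (sanChar c) = false := by
        subst hd; decide
      simp only [List.foldl, List.map, stepA, hd, if_true, sanChar, ite_true,
        PySem.Chars.split₀.go, hs, Bool.false_eq_true, if_false]
      have := ih ('.' :: cur) h
      simpa using this
    · have hs : PySem.Chars.isspace (sanChar c) = true := by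
        simp only [sanChar, hd, if_false, ite_false]; decide
      simp only [List.foldl, List.map, stepA, hd, if_false, ite_false,
        PySem.Chars.split₀.go, hs, if_true]
      by_cases hc : cur.isEmpty
      · have h0 : cur.length = 0 := by simpa [List.isEmpty_iff, List.length_eq_zero_iff] using hc
        simp only [hc, if_true, ite_true]
        have := ih [] (if (2:Int) ≤ (cur.length : Int) then h + 1 else h)
        simp only [List.length_nil, Int.natCast_zero] at this ⊢
        rw [this, h0]
        norm_num
      · simp only [hc, Bool.false_eq_true, if_false, ite_false]
        rw [go_acc (rest.map sanChar) [] [cur.reverse]]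
        have := ih [] (if (2:Int) ≤ (cur.length : Int) then h + 1 else h)
        simp only [List.length_nil, Int.natCast_zero] at this
        rw [this]
        simp only [List.reverse_cons, List.reverse_nil, List.nil_append,
          List.countP_append]
        by_cases h2 : 2 ≤ cur.length
        · have h2' : (2:Int) ≤ (cur.length : Int) := by exact_mod_cast h2
          simp [List.countP_cons, h2, h2']
          omega
        · have h2' : ¬ (2:Int) ≤ (cur.length : Int) := by exact_mod_cast h2
          simp [List.countP_cons, h2, h2']

-- B's per-line count, expressed through countP on the char level
theorem seats_eq (line : String) :
    seats line = ((PySem.Chars.split₀.go (line.toList.map sanChar) [] []).countP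
      (fun w => decide (2 ≤ w.length)) : Int) := by
  unfold seats
  have h1 : PySem.Str.split₀ (String.ofList (line.toList.map sanChar))
      = (PySem.Chars.split₀ (line.toList.map sanChar)).map String.ofList := by
    simp [PySem.Str.split₀]
  rw [h1, List.foldl_map]
  have hf : (fun (acc : Int) (w : List Char) =>
        if 2 ≤ PySem.Str.len (String.ofList w) then acc + 1 else acc)
      = (fun (acc : Int) (w : List Char) =>
        if (fun w : List Char => decide (2 ≤ w.length)) w = true then acc + 1 else acc) := by
    funext acc w
    have hl : PySem.Str.len (String.ofList w) = (w.length : Int) := by simp [PySem.Str.len]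
    rw [hl]
    by_cases h2 : 2 ≤ w.length
    · have h2' : (2:Int) ≤ (w.length : Int) := by exact_mod_cast h2
      simp [h2, h2']
    · have h2' : ¬ (2:Int) ≤ (w.length : Int) := by exact_mod_cast h2
      simp [h2, h2']
  rw [hf, PySem.List.foldl_count_if]
  simp [PySem.Chars.split₀]

-- A's per-row body equals "carry + seats"
theorem row_eq (h : Int) (line : String) :
    flushA (line.toList.foldl stepA ((0 : Int), h)) = h + seats line := by
  rw [seats_eq]
  simpa using key line.toList [] h

theorem fold_sum (lines : List String) : ∀ (h : Int),
    lines.foldl (fun h row => flushA (row.toList.foldl stepA ((0 : Int), h))) h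
      = h + (lines.map seats).sum := by
  induction lines with
  | nil => intro h; simp
  | cons l rest ih =>
    intro h
    simp only [List.foldl, List.map, List.sum_cons]
    rw [ih, row_eq]
    ring

-- ===== VERDICT (by name: the statement is the Claim_ definition above) =====
theorem count_lie_down_places_spec : Claim_equal_count_lie_down_places := by
  intro N room _ _
  unfold Spec_count_lie_down_places count_lie_down_places count_lie_down_places_alt
  have h1 : room.foldl (fun h row => flushA (row.toList.foldl stepA ((0 : Int), h))) 0
      = (room.map seats).sum := by
    simpa using fold_sum room 0
  have h2 : (PySem.List.pyRange 0 N 1).foldl (fun v col =>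
        flushA ((PySem.List.pyRange 0 N 1).foldl
          (fun st row => stepA st (cellAt room row col)) ((0 : Int), v))) 0
      = (((PySem.List.pyRange 0 N 1).map (fun c =>
          String.ofList ((PySem.List.pyRange 0 N 1).map (fun r => cellAt room r c)))).map seats).sum := by
    have hcols := fold_sum ((PySem.List.pyRange 0 N 1).map (fun c =>
      String.ofList ((PySem.List.pyRange 0 N 1).map (fun r => cellAt room r c)))) 0
    rw [List.foldl_map] at hcols
    simp only [String.toList_ofList, List.foldl_map] at hcols
    simpa using hcols
  exact Prod.ext h1 h2
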